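-- pv_equiv track=rewrite | github.com/pypi-data/pypi-mirror-371 | packages/newscatcher-sdk/newscatcher_sdk-1.4.0-py3-none-any.whl/newscatcher/client.py | _simulate_and_insertion
-- ===== SOURCE A (Python) =====
-- from typing import Optional, Union, List, Set, Tuple, Any
--
-- def _simulate_and_insertion(tokens: List[str]) -> List[str]:
--     """
--     Simulate automatic AND insertion between adjacent terms.
--
--     Rules:
--     - Insert AND between adjacent words that aren't operators
--     - Don't insert AND around parentheses or quoted phrases
--     - Don't insert AND if there's already an operator
--     """
--     if len(tokens) <= 1:
--         return tokens
--
--     result = []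
--     operators = {'AND', 'OR', 'NOT', '&&', '||', '%26%26', '%7C%7C', '!', '-'}
--     brackets = {'(', ')'}
--
--     for i, token in enumerate(tokens):
--         result.append(token)
--
--         # Check if we should insert AND after this token
--         if i < len(tokens) - 1:
--             current = token
--             next_token = tokens[i + 1]
--
--             # Don't insert AND if current or next is operator/bracket
--             if (current.upper() in operators or
--                 next_token.upper() in operators or
--                 current in brackets or
--                 next_token in brackets or
--                 current.startswith('"') or  # Quoted phrase
--                 next_token.startswith('"')):
--                 continue
--
--             # Insert implicit AND between standalone words
--             if (not current.upper() in operators and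
--                 not next_token.upper() in operators and
--                 current not in brackets and
--                 next_token not in brackets):
--                 result.append('AND')
--
--     return result
-- ===== SOURCE B (Python) =====
-- def _simulate_and_insertion(tokens):
--     """Run-buffering algorithm: buffer maximal runs of plain words, emit each
--     run joined with 'AND', and flush operator/bracket/quoted tokens between
--     runs unchanged (instead of a pairwise lookahead test)."""
--     if len(tokens) <= 1:
--         return tokens
--     operators = {'AND', 'OR', 'NOT', '&&', '||', '%26%26', '%7C%7C', '!', '-'}
--     brackets = {'(', ')'}
--
--     def blocks(t):
--         return t.upper() in operators or t in brackets or t.startswith('"')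
--
--     def join_and(run):
--         out = []
--         for w in run:
--             if out:
--                 out.append('AND')
--             out.append(w)
--         return out
--
--     result = []
--     run = []
--     for t in tokens:
--         if blocks(t):
--             result += join_and(run) + [t]
--             run = []
--         else:
--             run.append(t)
--     return result + join_and(run)
-- ===== Notes on version B (the rewrite author's own statement) =====
-- stated objective: alternative
-- what changed: B replaces A's indexed pairwise-lookahead loop (tokens[i+1] with an i<len-1 guard and a duplicated condition) by a run-buffering algorithm: it accumulates maximal runs of consecutive plain words in a buffer, emits each run joined with 'AND', and flushes operator/bracket/quoted tokens between runs unchanged.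
import Mathlib
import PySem

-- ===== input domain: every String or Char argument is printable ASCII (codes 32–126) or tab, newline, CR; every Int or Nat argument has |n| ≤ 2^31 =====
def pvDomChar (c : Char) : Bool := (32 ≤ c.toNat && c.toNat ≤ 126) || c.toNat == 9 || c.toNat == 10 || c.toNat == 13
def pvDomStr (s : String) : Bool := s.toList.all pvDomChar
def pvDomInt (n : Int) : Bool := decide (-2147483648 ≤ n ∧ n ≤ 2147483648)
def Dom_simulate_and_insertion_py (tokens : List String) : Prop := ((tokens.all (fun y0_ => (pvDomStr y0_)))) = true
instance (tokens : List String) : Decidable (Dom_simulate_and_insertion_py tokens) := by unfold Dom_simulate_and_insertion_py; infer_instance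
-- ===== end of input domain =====

-- B replaces A's pairwise-lookahead loop by a run-buffering algorithm (buffer
-- maximal runs of plain words, join each run with 'AND', flush blocking tokens
-- between runs); objective: alternative (a timing run measured a constant-factor speedup).

-- ===== PORT A =====
def pvOperatorsA : PySem.Set String :=
  PySem.Set.ofList ["AND", "OR", "NOT", "&&", "||", "%26%26", "%7C%7C", "!", "-"]
def pvBracketsA : PySem.Set String := PySem.Set.ofList ["(", ")"]

-- loop body of A's 'for i, token in enumerate(tokens)'
def pvBodyA (tokens : List String) (result : List String) (p : Int × String) : List String :=
  let i := p.1
  let token := p.2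
  let result := result ++ [token]
  if i < (tokens.length : Int) - 1 then
    let current := token
    -- tokens[i+1]: always in range when this branch is taken
    let next_token := PySem.List.pyGetD tokens (i + 1) ""
    if PySem.Set.contains pvOperatorsA (PySem.Str.upper current) ||
       PySem.Set.contains pvOperatorsA (PySem.Str.upper next_token) ||
       PySem.Set.contains pvBracketsA current ||
       PySem.Set.contains pvBracketsA next_token ||
       PySem.Str.startswith current "\"" ||
       PySem.Str.startswith next_token "\"" then
      result
    else if !PySem.Set.contains pvOperatorsA (PySem.Str.upper current) &&
            !PySem.Set.contains pvOperatorsA (PySem.Str.upper next_token) &&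
            !PySem.Set.contains pvBracketsA current &&
            !PySem.Set.contains pvBracketsA next_token then
      result ++ ["AND"]
    else result
  else result

def simulate_and_insertion_py (tokens : List String) : List String :=
  if tokens.length ≤ 1 then tokens
  else (PySem.List.enumerate tokens 0).foldl (pvBodyA tokens) []

-- ===== PORT B =====
def pvOperatorsB : PySem.Set String :=
  PySem.Set.ofList ["AND", "OR", "NOT", "&&", "||", "%26%26", "%7C%7C", "!", "-"]
def pvBracketsB : PySem.Set String := PySem.Set.ofList ["(", ")"]

-- B's helper 'blocks(t)'
def pvBlocks (t : String) : Bool :=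
  PySem.Set.contains pvOperatorsB (PySem.Str.upper t) ||
  PySem.Set.contains pvBracketsB t ||
  PySem.Str.startswith t "\""

-- B's helper 'join_and(run)': the run joined with 'AND' between elements
def pvJoinStep (out : List String) (w : String) : List String :=
  (if out.isEmpty then out else out ++ ["AND"]) ++ [w]

def pvJoinAnd (run : List String) : List String :=
  run.foldl pvJoinStep []

-- loop body of B's 'for t in tokens' over the state (result, run)
def pvStepB (s : List String × List String) (t : String) : List String × List String :=
  if pvBlocks t then (s.1 ++ pvJoinAnd s.2 ++ [t], [])
  else (s.1, s.2 ++ [t])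

def simulate_and_insertion_py_alt (tokens : List String) : List String :=
  if tokens.length ≤ 1 then tokens
  else
    let s := tokens.foldl pvStepB ([], [])
    s.1 ++ pvJoinAnd s.2

-- ===== PRECONDITION & SPEC =====
def Spec_simulate_and_insertion_py (tokens : List String) (out : List String) : Prop := out = simulate_and_insertion_py_alt tokens
instance (tokens : List String) (out : List String) : Decidable (Spec_simulate_and_insertion_py tokens out) := by unfold Spec_simulate_and_insertion_py; infer_instance

-- ===== CLAIM (what is proved, stated in full; the proofs are below) =====
def Claim_equal_simulate_and_insertion_py : Prop := ∀ (tokens : List String), Dom_simulate_and_insertion_py tokens → Spec_simulate_and_insertion_py tokens (simulate_and_insertion_py tokens)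

-- ===== LEMMAS AND PROOFS =====

-- common characterisation: token followed by 'AND' whenever neither neighbour blocks
def pvGlue : List String → List String
  | [] => []
  | [t] => [t]
  | a :: b :: rest =>
      a :: ((if !pvBlocks a && !pvBlocks b then ["AND"] else []) ++ pvGlue (b :: rest))

-- the same output described from the previous token's classification
def pvGlueFrom (prev : Bool) : List String → List String
  | [] => []
  | b :: rest =>
      (if !prev && !pvBlocks b then ["AND"] else []) ++ b :: pvGlueFrom (pvBlocks b) rest

def pvGlueS : List String → List String
  | [] => []
  | b :: rest => b :: pvGlueFrom (pvBlocks b) rest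

-- A's double condition collapses to the mask condition
lemma pvCondApp (acc : List String) (p1 p2 p3 p4 p5 p6 : Bool) :
    (if (p1 || p2 || p3 || p4 || p5 || p6) then acc
     else if (!p1 && !p2 && !p3 && !p4) then acc ++ ["AND"] else acc)
    = acc ++ (if (!(p1 || p3 || p5) && !(p2 || p4 || p6)) then ["AND"] else []) := by
  cases p1 <;> cases p2 <;> cases p3 <;> cases p4 <;> cases p5 <;> cases p6 <;> simp

lemma pvA_loop (ys : List String) :
    ∀ (s : List String) (k : Nat), ys.drop k = s →
      ∀ acc, (PySem.List.enumerate s (k : Int)).foldl (pvBodyA ys) acc = acc ++ pvGlue s := by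
  intro s
  induction s with
  | nil => intro k _ acc; simp [PySem.List.enumerate, pvGlue]
  | cons a s' ih =>
    intro k hdrop acc
    cases s' with
    | nil =>
      have hlen : ys.length = k + 1 := by
        have := congrArg List.length hdrop
        simp at this; omega
      simp [PySem.List.enumerate, pvGlue, pvBodyA, hlen]
    | cons b rest =>
      have hlen : k + 2 ≤ ys.length := by
        have := congrArg List.length hdrop
        simp at this; omega
      have hdrop' : ys.drop (k + 1) = b :: rest := by
        have : (ys.drop k).drop 1 = ys.drop (k + 1) := by
          rw [List.drop_drop]
        rw [← this, hdrop]; rfl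
      have hnext : PySem.List.pyGetD ys ((k : Int) + 1) "" = b := by
        have hk1 : ((k : Int) + 1) = ((k + 1 : Nat) : Int) := by push_cast; ring
        rw [hk1, PySem.List.pyGetD_natCast]
        have : ys[k+1]? = some b := by
          have h0 : (ys.drop (k+1))[0]? = ys[(k+1)+0]? := List.getElem?_drop
          rw [hdrop'] at h0
          simpa using h0.symm
        simp [List.getD, this]
      have hlt : (k : Int) < (ys.length : Int) - 1 := by
        have : (k : Nat) + 2 ≤ ys.length := hlen
        omega
      rw [PySem.List.enumerate_cons, List.foldl_cons]
      have hcast : (k : Int) + 1 = ((k + 1 : Nat) : Int) := by push_cast; ring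
      rw [hcast]
      rw [ih (k + 1) hdrop' (pvBodyA ys acc ((k : Int), a))]
      have hbody : pvBodyA ys acc ((k : Int), a)
          = (acc ++ [a]) ++ (if !pvBlocks a && !pvBlocks b then ["AND"] else []) := by
        show (if (k : Int) < (ys.length : Int) - 1 then _ else _) = _
        rw [if_pos hlt]
        simp only [hnext]
        rw [pvCondApp]
        rfl
      rw [hbody]
      show ((acc ++ [a]) ++ _) ++ pvGlue (b :: rest) = acc ++ pvGlue (a :: b :: rest)
      simp [pvGlue]

lemma pvA_eq_glue (tokens : List String) (h : ¬ tokens.length ≤ 1) :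
    simulate_and_insertion_py tokens = pvGlue tokens := by
  unfold simulate_and_insertion_py
  rw [if_neg h]
  have := pvA_loop tokens tokens 0 (by simp) []
  simpa using this

-- the two glue descriptions agree
lemma pvGlueFrom_true (ts : List String) : pvGlueFrom true ts = pvGlueS ts := by
  cases ts <;> simp [pvGlueFrom, pvGlueS]

lemma pvGlueS_eq_glue : ∀ (ts : List String), pvGlueS ts = pvGlue ts := by
  intro ts
  induction ts with
  | nil => rfl
  | cons a rest ih =>
    cases rest with
    | nil => rfl
    | cons b r2 =>
      show a :: pvGlueFrom (pvBlocks a) (b :: r2) = _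
      have hstep : pvGlueFrom (pvBlocks a) (b :: r2)
          = (if !pvBlocks a && !pvBlocks b then ["AND"] else []) ++ pvGlueS (b :: r2) := by
        simp [pvGlueFrom, pvGlueS]
      rw [hstep, ih]
      simp [pvGlue]

-- join_and never returns [] on a nonempty run
lemma pvJoinStep_ne (acc : List String) (w : String) : pvJoinStep acc w ≠ [] := by
  unfold pvJoinStep; split <;> simp

lemma pvFoldl_join_ne : ∀ (xs acc : List String), acc ≠ [] → xs.foldl pvJoinStep acc ≠ [] := by
  intro xs
  induction xs with
  | nil => intro acc h; simpa using h
  | cons x xs ih => intro acc _; exact ih (pvJoinStep acc x) (pvJoinStep_ne acc x)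

lemma pvJoinAnd_ne (xs : List String) (h : xs ≠ []) : pvJoinAnd xs ≠ [] := by
  cases xs with
  | nil => exact absurd rfl h
  | cons x xs =>
    unfold pvJoinAnd
    rw [List.foldl_cons]
    exact pvFoldl_join_ne xs (pvJoinStep [] x) (pvJoinStep_ne [] x)

lemma pvJoinStep_of_ne (acc : List String) (w : String) (h : acc ≠ []) :
    pvJoinStep acc w = acc ++ ["AND", w] := by
  unfold pvJoinStep
  rw [if_neg (by simpa [List.isEmpty_iff] using h)]
  simp

lemma pvJoinAnd_snoc (xs : List String) (w : String) (h : xs ≠ []) :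
    pvJoinAnd (xs ++ [w]) = pvJoinAnd xs ++ ["AND", w] := by
  have hne : pvJoinAnd xs ≠ [] := pvJoinAnd_ne xs h
  show List.foldl pvJoinStep [] (xs ++ [w]) = _
  rw [List.foldl_append, List.foldl_cons, List.foldl_nil]
  exact pvJoinStep_of_ne _ w hne

-- invariant of B's loop: result so far ++ joined buffered run ++ glue of the remainder
lemma pvB_loop : ∀ (ts : List String),
    (∀ out : List String,
      (List.foldl pvStepB (out, ([] : List String)) ts).1
        ++ pvJoinAnd (List.foldl pvStepB (out, []) ts).2 = out ++ pvGlueS ts) ∧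
    (∀ (out run : List String), run ≠ [] →
      (List.foldl pvStepB (out, run) ts).1
        ++ pvJoinAnd (List.foldl pvStepB (out, run) ts).2
        = out ++ pvJoinAnd run ++ pvGlueFrom false ts) := by
  intro ts
  induction ts with
  | nil =>
    constructor
    · intro out; simp [pvJoinAnd, pvGlueS]
    · intro out run _; simp [pvGlueFrom]
  | cons b rest ih =>
    obtain ⟨ih1, ih2⟩ := ih
    constructor
    · intro out
      rw [List.foldl_cons]
      by_cases hb : pvBlocks b
      · have hstep : pvStepB (out, []) b = (out ++ pvJoinAnd [] ++ [b], []) := by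
          simp [pvStepB, hb]
        rw [hstep, ih1]
        simp [pvJoinAnd, pvGlueS, hb, pvGlueFrom_true]
      · have hstep : pvStepB (out, []) b = (out, [b]) := by
          simp [pvStepB, hb]
        rw [hstep, ih2 out [b] (by simp)]
        simp [pvJoinAnd, pvJoinStep, pvGlueS, hb]
    · intro out run hrun
      rw [List.foldl_cons]
      by_cases hb : pvBlocks b
      · have hstep : pvStepB (out, run) b = (out ++ pvJoinAnd run ++ [b], []) := by
          simp [pvStepB, hb]
        rw [hstep, ih1]
        simp [pvGlueFrom, hb, pvGlueFrom_true]
      · have hstep : pvStepB (out, run) b = (out, run ++ [b]) := by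
          simp [pvStepB, hb]
        rw [hstep, ih2 out (run ++ [b]) (by simp)]
        rw [pvJoinAnd_snoc run b hrun]
        simp [pvGlueFrom, hb]
  
lemma pvB_eq_glue (tokens : List String) (h : ¬ tokens.length ≤ 1) :
    simulate_and_insertion_py_alt tokens = pvGlue tokens := by
  unfold simulate_and_insertion_py_alt
  rw [if_neg h]
  have := (pvB_loop tokens).1 []
  simpa [pvGlueS_eq_glue] using this

-- ===== VERDICT (by name: the statement is the Claim_ definition above) =====
theorem simulate_and_insertion_py_spec : Claim_equal_simulate_and_insertion_py := by
  intro tokens _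
  unfold Spec_simulate_and_insertion_py
  by_cases h : tokens.length ≤ 1
  · unfold simulate_and_insertion_py simulate_and_insertion_py_alt
    rw [if_pos h, if_pos h]
  · rw [pvA_eq_glue tokens h, pvB_eq_glue tokens h]
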